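-- pv_equiv track=rewrite | github.com/rich-bread/rumm_py | realmap/integrate.py | get_xzulbr
-- ===== SOURCE A (Python) =====
-- def get_xzulbr(mapdata:list) -> list:
--     xl = []
--     zl = []
--     for md in mapdata:
--         xl.append(md[3])
--         zl.append(md[4])
--     xzulbr = [min(xl),min(zl),max(xl),max(zl)]
--     return xzulbr
-- ===== SOURCE B (Python) =====
-- def get_xzulbr(mapdata: list) -> list:
--     first = mapdata[0]
--     xmin = xmax = first[3]
--     zmin = zmax = first[4]
--     for md in mapdata[1:]:
--         x = md[3]
--         z = md[4]
--         if x < xmin: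
--             xmin = x
--         elif x > xmax:
--             xmax = x
--         if z < zmin:
--             zmin = z
--         elif z > zmax:
--             zmax = z
--     return [xmin, zmin, xmax, zmax]
-- ===== Notes on version B (the rewrite author's own statement) =====
-- stated objective: simpler
-- what changed: Replaces the two intermediate lists plus four min/max reductions with a single pass that keeps four running extrema seeded from the first row; Pre_ excludes empty mapdata and short rows, where A raises (ValueError/IndexError).
-- outside the precondition, e.g. on get_xzulbr([]): A raises ValueError, B raises IndexError
import Mathlib
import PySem

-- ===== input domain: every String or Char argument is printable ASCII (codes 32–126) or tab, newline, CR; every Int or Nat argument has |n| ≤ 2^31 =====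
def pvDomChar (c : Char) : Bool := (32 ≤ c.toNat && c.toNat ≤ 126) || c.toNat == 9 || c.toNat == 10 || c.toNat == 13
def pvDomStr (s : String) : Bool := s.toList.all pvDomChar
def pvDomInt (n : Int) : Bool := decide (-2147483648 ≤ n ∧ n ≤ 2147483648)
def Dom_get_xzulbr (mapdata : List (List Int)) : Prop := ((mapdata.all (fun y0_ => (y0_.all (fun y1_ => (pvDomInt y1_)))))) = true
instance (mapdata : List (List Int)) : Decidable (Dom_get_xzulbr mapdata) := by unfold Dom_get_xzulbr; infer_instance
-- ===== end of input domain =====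

-- B replaces A's two list-building passes and four min/max reductions with one pass keeping four running extrema seeded from the first row (objective: simpler).


-- ===== PORT A =====
-- the loop appends md[3] and md[4]; pyGet?.getD 0 is exact inside Pre_ (rows have ≥ 5 entries)
def get_xzulbr (mapdata : List (List Int)) : List Int :=
  let p := mapdata.foldl
    (fun (s : List Int × List Int) md =>
      (s.1 ++ [(PySem.List.pyGet? md 3).getD 0], s.2 ++ [(PySem.List.pyGet? md 4).getD 0]))
    ([], [])
  let xl := p.1
  let zl := p.2
  [ (PySem.List.min? xl (fun y => y)).getD 0
  , (PySem.List.min? zl (fun y => y)).getD 0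
  , (PySem.List.max? xl (fun y => y)).getD 0
  , (PySem.List.max? zl (fun y => y)).getD 0 ]

-- ===== PORT B =====
-- seeds the four extrema from the first row, then a single pass over the rest;
-- on empty mapdata B's Python raises IndexError (outside Pre_), here []
def get_xzulbr_alt (mapdata : List (List Int)) : List Int :=
  match mapdata with
  | [] => []
  | first :: rest =>
    let x0 := (PySem.List.pyGet? first 3).getD 0
    let z0 := (PySem.List.pyGet? first 4).getD 0
    let s := rest.foldl
      (fun (s : Int × Int × Int × Int) md =>
        let x := (PySem.List.pyGet? md 3).getD 0
        let z := (PySem.List.pyGet? md 4).getD 0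
        let xmin := s.1; let xmax := s.2.1; let zmin := s.2.2.1; let zmax := s.2.2.2
        let xp : Int × Int := if x < xmin then (x, xmax) else if xmax < x then (xmin, x) else (xmin, xmax)
        let zp : Int × Int := if z < zmin then (z, zmax) else if zmax < z then (zmin, z) else (zmin, zmax)
        (xp.1, xp.2, zp.1, zp.2))
      (x0, x0, z0, z0)
    [s.1, s.2.2.1, s.2.1, s.2.2.2]

-- ===== PRECONDITION & SPEC =====
-- Pre_ excludes exactly the inputs where A raises: empty mapdata (ValueError from min([])) and rows with
-- fewer than 5 entries (IndexError on md[3]/md[4]); B also raises on both kinds of input.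
def Pre_get_xzulbr (mapdata : List (List Int)) : Prop :=
  mapdata ≠ [] ∧ ∀ md ∈ mapdata, 5 ≤ md.length
instance (mapdata : List (List Int)) : Decidable (Pre_get_xzulbr mapdata) := by
  unfold Pre_get_xzulbr; infer_instance
def pvWitness_get_xzulbr : List (List Int) := [[0, 1, 2, 3, 4], [9, 8, 7, -6, 5]]

def Spec_get_xzulbr (mapdata : List (List Int)) (out : List Int) : Prop := out = get_xzulbr_alt mapdata
instance (mapdata : List (List Int)) (out : List Int) : Decidable (Spec_get_xzulbr mapdata out) := by unfold Spec_get_xzulbr; infer_instance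

-- ===== CLAIM =====
def Claim_equal_get_xzulbr : Prop := ∀ (mapdata : List (List Int)), Dom_get_xzulbr mapdata → Pre_get_xzulbr mapdata → Spec_get_xzulbr mapdata (get_xzulbr mapdata)

-- ===== LEMMAS AND PROOFS =====

def pvX (md : List Int) : Int := (PySem.List.pyGet? md 3).getD 0
def pvZ (md : List Int) : Int := (PySem.List.pyGet? md 4).getD 0

-- A's pair-building loop produces the two maps
theorem pvA_pair (mapdata : List (List Int)) (xl zl : List Int) :
    mapdata.foldl
      (fun (s : List Int × List Int) md =>
        (s.1 ++ [(PySem.List.pyGet? md 3).getD 0], s.2 ++ [(PySem.List.pyGet? md 4).getD 0])) (xl, zl)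
    = (xl ++ mapdata.map pvX, zl ++ mapdata.map pvZ) := by
  induction mapdata generalizing xl zl with
  | nil => simp
  | cons h t ih => simp [List.foldl_cons, ih, pvX, pvZ]

-- B's fold keeps running extrema of the remaining rows, given each min-seed ≤ its max-seed
theorem pvB_fold (mapdata : List (List Int)) (a b c d : Int) (hab : a ≤ b) (hcd : c ≤ d) :
    mapdata.foldl
      (fun (s : Int × Int × Int × Int) md =>
        let x := (PySem.List.pyGet? md 3).getD 0
        let z := (PySem.List.pyGet? md 4).getD 0
        let xmin := s.1; let xmax := s.2.1; let zmin := s.2.2.1; let zmax := s.2.2.2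
        let xp : Int × Int := if x < xmin then (x, xmax) else if xmax < x then (xmin, x) else (xmin, xmax)
        let zp : Int × Int := if z < zmin then (z, zmax) else if zmax < z then (zmin, z) else (zmin, zmax)
        (xp.1, xp.2, zp.1, zp.2))
      (a, b, c, d)
    = ((mapdata.map pvX).foldl min a, (mapdata.map pvX).foldl max b,
       (mapdata.map pvZ).foldl min c, (mapdata.map pvZ).foldl max d) := by
  induction mapdata generalizing a b c d with
  | nil => simp
  | cons h t ih =>
    simp only [List.foldl_cons, List.map_cons]
    have hx : (if pvX h < a then (pvX h, b) else if b < pvX h then (a, pvX h) else (a, b))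
        = (min a (pvX h), max b (pvX h)) := by
      split_ifs with h1 h2 <;> simp [min_def, max_def] <;> omega
    have hz : (if pvZ h < c then (pvZ h, d) else if d < pvZ h then (c, pvZ h) else (c, d))
        = (min c (pvZ h), max d (pvZ h)) := by
      split_ifs with h1 h2 <;> simp [min_def, max_def] <;> omega
    simp only [pvX, pvZ] at hx hz
    simp only [hx, hz]
    exact ih _ _ _ _ (le_trans (min_le_left a _) (le_trans hab (le_max_left b _)))
                     (le_trans (min_le_left c _) (le_trans hcd (le_max_left d _)))

-- ===== VERDICT =====
theorem get_xzulbr_spec : Claim_equal_get_xzulbr := by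
  intro mapdata _ hpre
  unfold Spec_get_xzulbr get_xzulbr get_xzulbr_alt
  obtain ⟨hne, _⟩ := hpre
  match mapdata, hne with
  | md :: rest, _ =>
    simp [pvA_pair, pvB_fold _ _ _ _ _ (le_refl _) (le_refl _),
          PySem.List.min?_id_cons, PySem.List.max?_id_cons]
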